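-- pv_equiv track=rewrite | github.com/JiaPengShang/JockeyAI | evaluate_accuracy.py | _is_similar_value
-- ===== SOURCE A (Python) =====
-- def _is_similar_value(val1: str, val2: str) -> bool:
--     """Check if two values are similar (for sleep diary fields)"""
--     if not val1 or not val2:
--         return val1 == val2
--
--     # Normalize values
--     v1 = val1.lower().strip()
--     v2 = val2.lower().strip()
--
--     # Direct match
--     if v1 == v2:
--         return True
--
--     # Common variations
--     variations = {
--         'no': ['0', 'none', 'null'],
--         'yes': ['1', 'y'],
--         'vg': ['very good', 'very_good'],
--         'g': ['good'],
--         'a': ['average'],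
--         'b': ['bad'],
--         'vb': ['very bad', 'very_bad']
--     }
--
--     for key, variants in variations.items():
--         if (v1 == key and v2 in variants) or (v2 == key and v1 in variants):
--             return True
--
--     return False
-- ===== SOURCE B (Python) =====
-- _VARIANT_TO_KEY = {
--     '0': 'no', 'none': 'no', 'null': 'no',
--     '1': 'yes', 'y': 'yes',
--     'very good': 'vg', 'very_good': 'vg',
--     'good': 'g',
--     'average': 'a',
--     'bad': 'b',
--     'very bad': 'vb', 'very_bad': 'vb',
-- }
--
--
-- def _is_similar_value(val1: str, val2: str) -> bool:
--     """Check if two values are similar (for sleep diary fields)"""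
--     if not val1 or not val2:
--         return val1 == val2
--     v1 = val1.lower().strip()
--     v2 = val2.lower().strip()
--     if v1 == v2:
--         return True
--     return _VARIANT_TO_KEY.get(v1) == v2 or _VARIANT_TO_KEY.get(v2) == v1
-- ===== Notes on version B (the rewrite author's own statement) =====
-- stated objective: simpler
-- what changed: The loop over the variations dict checking both directions is replaced by a single flat inverted dictionary variant->canonical-key, so the match becomes two constant-time lookups with no loop and no nested membership tests.
import Mathlib
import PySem

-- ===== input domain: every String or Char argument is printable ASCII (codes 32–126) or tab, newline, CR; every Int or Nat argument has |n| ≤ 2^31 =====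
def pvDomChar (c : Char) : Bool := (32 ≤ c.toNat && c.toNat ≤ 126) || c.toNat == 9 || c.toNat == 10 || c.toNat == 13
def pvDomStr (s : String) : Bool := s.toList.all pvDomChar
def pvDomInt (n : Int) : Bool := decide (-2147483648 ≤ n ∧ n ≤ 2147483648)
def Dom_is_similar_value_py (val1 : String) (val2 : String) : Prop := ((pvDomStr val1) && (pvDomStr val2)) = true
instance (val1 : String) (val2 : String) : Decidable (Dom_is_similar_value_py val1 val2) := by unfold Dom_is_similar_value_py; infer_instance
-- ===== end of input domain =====

-- B replaces A's loop over the variations dict (checking both directions with list membership)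
-- by a single flat inverted variant→key dictionary and two lookups; objective: simpler.

-- ===== PORT A =====
-- the literal variations dict; A iterates over its items in insertion order
def pvVariations : List (String × List String) :=
  [("no", ["0", "none", "null"]),
   ("yes", ["1", "y"]),
   ("vg", ["very good", "very_good"]),
   ("g", ["good"]),
   ("a", ["average"]),
   ("b", ["bad"]),
   ("vb", ["very bad", "very_bad"])]

-- the for-loop with early `return True`
def pvLoopA (v1 v2 : String) : List (String × List String) → Bool
  | [] => false
  | (key, variants) :: rest =>
    if (v1 == key && variants.contains v2) || (v2 == key && variants.contains v1) then true
    else pvLoopA v1 v2 rest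

def is_similar_value_py (val1 : String) (val2 : String) : Bool :=
  if val1 == "" || val2 == "" then val1 == val2
  else
    let v1 := PySem.Str.strip (PySem.Str.lower val1)
    let v2 := PySem.Str.strip (PySem.Str.lower val2)
    if v1 == v2 then true
    else pvLoopA v1 v2 pvVariations

-- ===== PORT B =====
-- the flat inverted dictionary variant → canonical key
def pvVariantToKey : PySem.Dict String String :=
  PySem.Dict.ofList
    [("0", "no"), ("none", "no"), ("null", "no"),
     ("1", "yes"), ("y", "yes"),
     ("very good", "vg"), ("very_good", "vg"),
     ("good", "g"),
     ("average", "a"),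
     ("bad", "b"),
     ("very bad", "vb"), ("very_bad", "vb")]

def is_similar_value_py_alt (val1 : String) (val2 : String) : Bool :=
  if val1 == "" || val2 == "" then val1 == val2
  else
    let v1 := PySem.Str.strip (PySem.Str.lower val1)
    let v2 := PySem.Str.strip (PySem.Str.lower val2)
    if v1 == v2 then true
    else pvVariantToKey.get? v1 == some v2 || pvVariantToKey.get? v2 == some v1

-- ===== PRECONDITION & SPEC =====
def Spec_is_similar_value_py (val1 : String) (val2 : String) (out : Bool) : Prop := out = is_similar_value_py_alt val1 val2
instance (val1 : String) (val2 : String) (out : Bool) : Decidable (Spec_is_similar_value_py val1 val2 out) := by unfold Spec_is_similar_value_py; infer_instance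

-- ===== CLAIM (what is proved, stated in full; the proofs are below) =====
def Claim_equal_is_similar_value_py : Prop := ∀ (val1 : String) (val2 : String), Dom_is_similar_value_py val1 val2 → Spec_is_similar_value_py val1 val2 (is_similar_value_py val1 val2)

-- ===== LEMMAS AND PROOFS =====

-- the literal inverted dict as an if-chain
theorem pvGet (s : String) :
    pvVariantToKey.get? s =
      (if "0" == s then some "no" else if "none" == s then some "no" else
       if "null" == s then some "no" else if "1" == s then some "yes" else
       if "y" == s then some "yes" else if "very good" == s then some "vg" else
       if "very_good" == s then some "vg" else if "good" == s then some "g" else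
       if "average" == s then some "a" else if "bad" == s then some "b" else
       if "very bad" == s then some "vb" else if "very_bad" == s then some "vb" else
       none) := by
  have h : pvVariantToKey = PySem.Dict.mk
      [("0", "no"), ("none", "no"), ("null", "no"),
       ("1", "yes"), ("y", "yes"),
       ("very good", "vg"), ("very_good", "vg"),
       ("good", "g"), ("average", "a"), ("bad", "b"),
       ("very bad", "vb"), ("very_bad", "vb")] := by decide
  rw [h]
  simp only [PySem.Dict.get?_mk_cons]
  rfl

theorem pvLoopA_eq (a b : String) (L : List (String × List String)) :
    pvLoopA a b L = L.any (fun p => (a == p.1 && p.2.contains b) || (b == p.1 && p.2.contains a)) := by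
  induction L with
  | nil => rfl
  | cons p rest ih =>
    obtain ⟨k, vs⟩ := p
    rw [List.any_cons]
    rw [show pvLoopA a b ((k, vs) :: rest) =
          (if ((a == k && vs.contains b) || (b == k && vs.contains a)) = true then true
           else pvLoopA a b rest) from rfl]
    by_cases h : ((a == k && vs.contains b) || (b == k && vs.contains a)) = true
    · rw [if_pos h, h, Bool.true_or]
    · rw [if_neg h, ih, Bool.eq_false_iff.mpr h, Bool.false_or]

theorem pvBeqComm (a b : String) : (a == b) = (b == a) := by
  by_cases h : a = b <;> simp [h, eq_comm]

set_option maxHeartbeats 1000000 in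
theorem pvKeyClause (x y : String) :
    (pvVariantToKey.get? y == some x) =
      ((x == "no" && (["0", "none", "null"] : List String).contains y) ||
       (x == "yes" && (["1", "y"] : List String).contains y) ||
       (x == "vg" && (["very good", "very_good"] : List String).contains y) ||
       (x == "g" && (["good"] : List String).contains y) ||
       (x == "a" && (["average"] : List String).contains y) ||
       (x == "b" && (["bad"] : List String).contains y) ||
       (x == "vb" && (["very bad", "very_bad"] : List String).contains y)) := by
  rw [pvGet y]
  split_ifs <;> simp_all [pvBeqComm]

set_option maxHeartbeats 1000000 in
theorem pvCore (a b : String) :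
    pvLoopA a b pvVariations =
      (pvVariantToKey.get? a == some b || pvVariantToKey.get? b == some a) := by
  rw [pvKeyClause b a, pvKeyClause a b, pvLoopA_eq]
  simp only [pvVariations, List.any_cons, List.any_nil]
  simp only [Bool.false_or, Bool.or_assoc, Bool.or_comm, Bool.or_left_comm]

theorem pvTail (v1 v2 : String) :
    (if (v1 == v2) = true then true else pvLoopA v1 v2 pvVariations) =
      (if (v1 == v2) = true then true
       else pvVariantToKey.get? v1 == some v2 || pvVariantToKey.get? v2 == some v1) := by
  split_ifs with h
  · simp
  · exact pvCore _ _

-- ===== VERDICT (by name: the statement is the Claim_ definition above) =====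
theorem is_similar_value_py_spec : Claim_equal_is_similar_value_py := by
  intro val1 val2 _
  unfold Spec_is_similar_value_py is_similar_value_py is_similar_value_py_alt
  cases hq : (val1 == "" || val2 == "")
  · simp only [Bool.false_eq_true, if_false]
    exact pvTail _ _
  · simp
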